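-- pv_equiv track=rewrite | github.com/Nickedude/advent_of_code_2017 | nickedude-java/Day_21/Day_21.py | mulLine
-- ===== SOURCE A (Python) =====
-- def mulLine(line):
--     pattern = []
--     i = 0
--     j = 0
--     pattern.append([])
--     while i < len(line):
--         if line[i] == '/':
--             pattern.append([])
--             j += 1
--         else:
--             pattern[j].append(line[i])
--         i += 1
--     return pattern
-- ===== SOURCE B (Python) =====
-- def mulLine(line):
--     return [list(row) for row in line.split('/')]
-- ===== Notes on version B (the rewrite author's own statement) =====
-- stated objective: idiomatic
-- what changed: B tokenizes the line with str.split on the separator and maps each token to its character list, instead of A's manual index-driven character scan that maintains an explicit row counter and mutates the row at that index; the split and list() work runs in C, which a timing run measured as a constant-factor speedup.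
import Mathlib
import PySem

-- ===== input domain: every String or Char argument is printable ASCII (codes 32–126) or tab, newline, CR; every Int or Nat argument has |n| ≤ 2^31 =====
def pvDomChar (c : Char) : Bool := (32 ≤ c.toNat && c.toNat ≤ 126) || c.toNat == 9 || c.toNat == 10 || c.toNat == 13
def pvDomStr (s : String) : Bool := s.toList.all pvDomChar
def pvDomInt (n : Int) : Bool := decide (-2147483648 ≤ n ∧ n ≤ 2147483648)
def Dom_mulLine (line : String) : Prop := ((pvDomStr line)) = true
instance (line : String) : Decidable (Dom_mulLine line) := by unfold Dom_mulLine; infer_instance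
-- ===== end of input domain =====

-- B tokenizes with split('/') and maps tokens to character lists; A scans characters by index. Equivalent on all inputs.

-- ===== PORT A =====
-- A: while i < len(line): append '/'-separated rows, mutating pattern[j]; ported as a fold over range(len(line)) with pyGetD.
def mulLine (line : String) : List (List String) :=
  let cs := line.toList
  ((PySem.List.pyRange 0 (cs.length : Int) 1).foldl
    (fun (st : List (List String) × Nat) i =>
      let c := PySem.List.pyGetD cs i ' '
      if c = '/' then (st.1 ++ [[]], st.2 + 1)
      else (st.1.set st.2 ((st.1.getD st.2 []) ++ [String.ofList [c]]), st.2))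
    ([[]], 0) : List (List String) × Nat).1

-- ===== PORT B =====
def mulLine_alt (line : String) : List (List String) :=
  match PySem.Str.split? line "/" with
  | some rows => rows.map (fun row => row.toList.map (fun c => String.ofList [c]))
  | none => []

-- ===== PRECONDITION & SPEC =====
def Spec_mulLine (line : String) (out : List (List String)) : Prop := out = mulLine_alt line
instance (line : String) (out : List (List String)) : Decidable (Spec_mulLine line out) := by unfold Spec_mulLine; infer_instance

-- ===== CLAIM (what is proved, stated in full; the proofs are below) =====
def Claim_equal_mulLine : Prop := ∀ (line : String), Dom_mulLine line → Spec_mulLine line (mulLine line)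

-- ===== LEMMAS AND PROOFS =====

-- reference splitter: rows of cs continuing the current row cur
def pvRows (cs : List Char) (cur : List Char) : List (List Char) :=
  match cs with
  | [] => [cur]
  | c :: t => if c = '/' then cur :: pvRows t [] else pvRows t (cur ++ [c])

theorem pvRows_go (fuel : Nat) (l cur : List Char) (acc : List (List Char)) (hl : l.length < fuel) :
    PySem.Chars.splitOn.go ['/'] fuel l cur acc
      = acc.reverse ++ pvRows l cur.reverse := by
  induction fuel generalizing l cur acc with
  | zero => omega
  | succ f ih =>
    cases l with
    | nil => simp [PySem.Chars.splitOn.go, pvRows]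
    | cons c rest =>
      simp only [PySem.Chars.splitOn.go]
      by_cases hc : c = '/'
      · subst hc
        rw [if_pos (by simp [List.isPrefixOf])]
        rw [ih _ _ _ (by simpa using Nat.lt_of_succ_lt_succ hl)]
        simp [pvRows]
      · rw [if_neg (by simp [List.isPrefixOf]; exact fun h => hc h.symm)]
        rw [ih _ _ _ (by simpa using Nat.lt_of_succ_lt_succ hl)]
        simp [pvRows, hc]

theorem pvFoldA (cs : List Char) (pre : List (List String)) (cur : List Char) :
    (cs.foldl
      (fun (st : List (List String) × Nat) c =>
        if c = '/' then (st.1 ++ [[]], st.2 + 1)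
        else (st.1.set st.2 ((st.1.getD st.2 []) ++ [String.ofList [c]]), st.2))
      (pre ++ [cur.map (fun c => String.ofList [c])], pre.length)).1
      = pre ++ (pvRows cs cur).map (List.map (fun c => String.ofList [c])) := by
  induction cs generalizing pre cur with
  | nil => simp [pvRows]
  | cons c t ih =>
    simp only [List.foldl_cons]
    by_cases hc : c = '/'
    · subst hc
      rw [if_pos rfl]
      have h1 : pre ++ [cur.map (fun c => String.ofList [c])] ++ [[]]
          = (pre ++ [cur.map (fun c => String.ofList [c])]) ++ [(([] : List Char)).map (fun c => String.ofList [c])] := by simp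
      have h2 : pre.length + 1 = (pre ++ [cur.map (fun c => String.ofList [c])]).length := by simp
      rw [h1, h2, ih]
      simp [pvRows]
    · rw [if_neg hc]
      have hget : (pre ++ [cur.map (fun c => String.ofList [c])]).getD pre.length []
          = cur.map (fun c => String.ofList [c]) := by
        simp [List.getD]
      have hset : (pre ++ [cur.map (fun c => String.ofList [c])]).set pre.length
            (cur.map (fun c => String.ofList [c]) ++ [String.ofList [c]])
          = pre ++ [(cur ++ [c]).map (fun c => String.ofList [c])] := by
        rw [List.set_append_right _ _ (le_refl _)]
        simp
      rw [hget, hset, ih]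
      simp [pvRows, hc]

-- ===== VERDICT (by name: the statement is the Claim_ definition above) =====
theorem mulLine_spec : Claim_equal_mulLine := by
  intro line _
  unfold Spec_mulLine mulLine mulLine_alt
  have hsep : "/".toList = ['/'] := by decide
  have hsplit : PySem.Chars.splitOn line.toList ['/'] = pvRows line.toList [] := by
    unfold PySem.Chars.splitOn
    rw [pvRows_go (line.toList.length + 1) line.toList [] [] (by omega)]
    simp
  simp only [PySem.Str.split?, PySem.Chars.split?, hsep, hsplit, List.isEmpty_cons,
    Bool.false_eq_true, if_false, Option.map_some]
  rw [PySem.List.foldl_pyRange_zero_pyGetD' line.toList ' '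
    (fun (st : List (List String) × Nat) c =>
      if c = '/' then (st.1 ++ [[]], st.2 + 1)
      else (st.1.set st.2 ((st.1.getD st.2 []) ++ [String.ofList [c]]), st.2)) ([[]], 0)]
  have hA := pvFoldA line.toList [] []
  simp only [List.map_nil, List.nil_append, List.length_nil] at hA
  rw [hA]
  simp [Function.comp, String.toList_ofList]
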